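-- pv_equiv track=rewrite | github.com/vovapasko/ads | DP/climbing_red_stairs.py | climbingRedStairs
-- ===== SOURCE A (Python) =====
-- def climbingRedStairs(n: int, k: int, red: list):
--     dp = [0] * (n + 1)
--     dp[0] = 1
--     for i in range(1, n + 1):
--         for j in range(1, k + 1):
--             if i - j < 0:
--                 continue
--             if i in red:
--                 dp[i] = 0
--             else:
--                 dp[i] += dp[i - j]
--     return dp[n]
-- ===== SOURCE B (Python) =====
-- def climbingRedStairs(n: int, k: int, red: list):
--     k = max(k, 0)
--     red_set = set(red)
--     dp = [0] * (n + 1)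
--     dp[0] = 1
--     window = 0
--     for i in range(1, n + 1):
--         window += dp[i - 1]
--         if i - 1 - k >= 0:
--             window -= dp[i - 1 - k]
--         dp[i] = 0 if i in red_set else window
--     return dp[n]
-- ===== Notes on version B (the rewrite author's own statement) =====
-- stated objective: faster
-- what changed: Replaces A's inner loop that rescans up to k predecessors (and a linear 'i in red' list scan) at every step by a single pass maintaining a sliding-window running sum plus a prebuilt set for the red lookup.
import Mathlib
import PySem

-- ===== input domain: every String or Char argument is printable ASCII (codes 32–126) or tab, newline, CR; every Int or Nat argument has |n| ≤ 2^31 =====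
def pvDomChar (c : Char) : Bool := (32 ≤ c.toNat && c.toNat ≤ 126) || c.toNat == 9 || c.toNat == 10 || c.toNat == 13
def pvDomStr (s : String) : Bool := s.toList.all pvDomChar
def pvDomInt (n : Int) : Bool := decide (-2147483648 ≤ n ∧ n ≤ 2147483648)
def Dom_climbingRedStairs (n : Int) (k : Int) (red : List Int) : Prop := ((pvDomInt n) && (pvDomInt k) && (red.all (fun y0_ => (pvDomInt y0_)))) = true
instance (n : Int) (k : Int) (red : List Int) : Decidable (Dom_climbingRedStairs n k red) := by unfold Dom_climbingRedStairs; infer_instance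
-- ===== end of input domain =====

-- B replaces A's O(n·k) rescan of the k predecessors at every step by a single O(n) pass
-- maintaining a sliding-window sum (add dp[i-1], drop dp[i-1-k]) with an O(1) red-set lookup.

-- ===== PORT A =====
def climbingRedStairs (n : Int) (k : Int) (red : List Int) : Int :=
  let dp := PySem.List.pySetD (List.replicate (n + 1).toNat (0 : Int)) 0 1
  let dp := (PySem.List.pyRange 1 (n + 1) 1).foldl (fun dp i =>
    (PySem.List.pyRange 1 (k + 1) 1).foldl (fun dp j =>
      if i - j < 0 then dp
      else if red.contains i then PySem.List.pySetD dp i 0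
      else PySem.List.pySetD dp i (PySem.List.pyGetD dp i 0 + PySem.List.pyGetD dp (i - j) 0)) dp) dp
  PySem.List.pyGetD dp n 0

-- ===== PORT B =====
def climbingRedStairs_alt (n : Int) (k : Int) (red : List Int) : Int :=
  let k' := max k 0
  let redSet : PySem.Set Int := PySem.Set.ofList red
  let dp0 := PySem.List.pySetD (List.replicate (n + 1).toNat (0 : Int)) 0 1
  let st := (PySem.List.pyRange 1 (n + 1) 1).foldl (fun (st : List Int × Int) i =>
      let w := st.2 + PySem.List.pyGetD st.1 (i - 1) 0
      let w := if i - 1 - k' ≥ 0 then w - PySem.List.pyGetD st.1 (i - 1 - k') 0 else w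
      (PySem.List.pySetD st.1 i (if PySem.Set.contains redSet i then 0 else w), w)) (dp0, 0)
  PySem.List.pyGetD st.1 n 0

-- ===== PRECONDITION & SPEC =====
-- Pre_ excludes exactly n < 0, where A raises IndexError on 'dp[0] = 1' (dp is empty).
def Pre_climbingRedStairs (n : Int) (_k : Int) (_red : List Int) : Prop := 0 ≤ n
instance (n : Int) (k : Int) (red : List Int) : Decidable (Pre_climbingRedStairs n k red) := by unfold Pre_climbingRedStairs; infer_instance
def pvWitness_climbingRedStairs : Int × Int × List Int := (4, 2, [2])

def Spec_climbingRedStairs (n : Int) (k : Int) (red : List Int) (out : Int) : Prop := out = climbingRedStairs_alt n k red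
instance (n : Int) (k : Int) (red : List Int) (out : Int) : Decidable (Spec_climbingRedStairs n k red out) := by unfold Spec_climbingRedStairs; infer_instance

-- ===== CLAIM (what is proved, stated in full; the proofs are below) =====
def Claim_equal_climbingRedStairs : Prop := ∀ (n : Int) (k : Int) (red : List Int), Dom_climbingRedStairs n k red → Pre_climbingRedStairs n k red → Spec_climbingRedStairs n k red (climbingRedStairs n k red)

-- ===== LEMMAS AND PROOFS =====

-- the common reference table: dpL m = [f 0, …, f m], f 0 = 1,
-- f i = 0 if i is red else the sum of the (up to k) previous entries
def winsum (L : List Int) (k : Int) : Int :=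
  (((List.range (min k.toNat L.length)).map (fun j => L.getD (L.length - 1 - j) 0))).sum

def dpL (k : Int) (red : List Int) : Nat → List Int
  | 0 => [1]
  | m + 1 => dpL k red m ++ [if red.contains ((m + 1 : Nat) : Int) then 0 else winsum (dpL k red m) k]

def stepA (k : Int) (red : List Int) (dp : List Int) (i : Int) : List Int :=
  (PySem.List.pyRange 1 (k + 1) 1).foldl (fun dp j =>
      if i - j < 0 then dp
      else if red.contains i then PySem.List.pySetD dp i 0
      else PySem.List.pySetD dp i (PySem.List.pyGetD dp i 0 + PySem.List.pyGetD dp (i - j) 0)) dp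

def stepB (k' : Int) (redSet : PySem.Set Int) (st : List Int × Int) (i : Int) : List Int × Int :=
  let w := st.2 + PySem.List.pyGetD st.1 (i - 1) 0
  let w := if i - 1 - k' ≥ 0 then w - PySem.List.pyGetD st.1 (i - 1 - k') 0 else w
  (PySem.List.pySetD st.1 i (if PySem.Set.contains redSet i then 0 else w), w)

lemma dpL_length (k : Int) (red : List Int) (m : Nat) : (dpL k red m).length = m + 1 := by
  induction m with
  | zero => rfl
  | succ m ih => simp [dpL, ih]

lemma set_append_cons (L t : List Int) (x y : Int) : (L ++ y :: t).set L.length x = L ++ x :: t := by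
  simp

lemma filter_range_lt (a b : Nat) :
    (List.range a).filter (fun t => decide (t < b)) = List.range (min a b) := by
  induction a with
  | zero => simp
  | succ a ih =>
    rw [List.range_succ, List.filter_append, ih]
    by_cases h : a < b
    · have h2 : min a b = a := by omega
      simp [h2, List.range_succ, h]
    · have : min (a + 1) b = min a b := by omega
      simp [this, h]

-- the sliding-window identity: window of the first m entries, plus entry m,
-- minus (when k ≤ m) entry m - k, is the window of the first m+1 entries
lemma winsum_step (L : List Int) (m : Nat) (hL : L.length = m + 1) (k : Int) :
    (if k.toNat ≤ m then winsum (L.take m) k + L.getD m 0 - L.getD (m - k.toNat) 0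
     else winsum (L.take m) k + L.getD m 0) = winsum L k := by
  have hlen : (L.take m).length = m := by simp [hL]
  have hV : winsum (L.take m) k
      = ((List.range (min k.toNat m)).map (fun j => L.getD (m - (j + 1)) 0)).sum := by
    unfold winsum
    rw [hlen]
    congr 1
    apply List.map_congr_left
    intro j hj
    rw [List.mem_range] at hj
    have hj' : m - 1 - j < m := by omega
    have : m - 1 - j = m - (j + 1) := by omega
    rw [this, List.getD, List.getD, List.getElem?_take_of_lt (by omega)]
  have hpeel : ∀ c : Nat, ((List.range (c + 1)).map (fun j => L.getD (m - j) 0)).sum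
      = L.getD m 0 + ((List.range c).map (fun j => L.getD (m - (j + 1)) 0)).sum := by
    intro c
    rw [List.range_succ_eq_map]
    simp [Function.comp_def]
  by_cases hk : k.toNat ≤ m
  · rw [if_pos hk, hV]
    have hmin : min k.toNat m = k.toNat := by omega
    have hmin' : min k.toNat L.length = k.toNat := by omega
    unfold winsum
    rw [hmin, hmin', hL]
    have := hpeel k.toNat
    rw [List.range_succ] at this
    simp only [List.map_append, List.sum_append, List.map_cons, List.map_nil, List.sum_cons,
      List.sum_nil] at this
    have harg : ∀ j : Nat, m + 1 - 1 - j = m - j := by omega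
    simp only [harg]
    omega
  · rw [if_neg hk, hV]
    have hmin : min k.toNat m = m := by omega
    have hmin' : min k.toNat L.length = m + 1 := by omega
    unfold winsum
    rw [hmin, hmin', hL]
    have := hpeel m
    have harg : ∀ j : Nat, m + 1 - 1 - j = m - j := by omega
    simp only [harg]
    omega

-- A's inner loop when stair i is red: every iteration writes the 0 already there
lemma foldA_red (red : List Int) (i : Int) (js dp : List Int)
    (hred : red.contains i = true) (hset : PySem.List.pySetD dp i 0 = dp) :
    js.foldl (fun dp j =>
      if i - j < 0 then dp
      else if red.contains i then PySem.List.pySetD dp i 0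
      else PySem.List.pySetD dp i (PySem.List.pyGetD dp i 0 + PySem.List.pyGetD dp (i - j) 0)) dp
    = dp := by
  induction js with
  | nil => rfl
  | cons j js ih =>
    simp only [List.foldl_cons]
    have hstep : (if i - j < 0 then dp
        else if red.contains i = true then PySem.List.pySetD dp i 0
        else PySem.List.pySetD dp i (PySem.List.pyGetD dp i 0 + PySem.List.pyGetD dp (i - j) 0))
        = dp := by
      rw [hred]
      split_ifs <;> simp_all
    rw [hstep]
    exact ih

-- A's inner loop when stair i is not red: it accumulates dp[i-j] over the admissible j
lemma foldA_sum (red : List Int) (i : Int) (hi1 : 1 ≤ i) (js : List Int) (X : List Int) (c : Int)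
    (hred : red.contains i = false) (hj : ∀ j ∈ js, 1 ≤ j) (hlen : i.toNat < X.length) :
    js.foldl (fun dp j =>
      if i - j < 0 then dp
      else if red.contains i then PySem.List.pySetD dp i 0
      else PySem.List.pySetD dp i (PySem.List.pyGetD dp i 0 + PySem.List.pyGetD dp (i - j) 0))
      (X.set i.toNat c)
    = X.set i.toNat
        (c + ((js.filter (fun j => decide (0 ≤ i - j))).map (fun j => X.getD (i - j).toNat 0)).sum) := by
  induction js generalizing c with
  | nil => simp
  | cons j js ih =>
    have hj1 : 1 ≤ j := hj j (List.mem_cons_self)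
    have hj' : ∀ j ∈ js, 1 ≤ j := fun a ha => hj a (List.mem_cons_of_mem _ ha)
    simp only [List.foldl_cons]
    by_cases hji : i - j < 0
    · have hstep : (if i - j < 0 then X.set i.toNat c
          else if red.contains i = true then PySem.List.pySetD (X.set i.toNat c) i 0
          else PySem.List.pySetD (X.set i.toNat c) i
            (PySem.List.pyGetD (X.set i.toNat c) i 0 + PySem.List.pyGetD (X.set i.toNat c) (i - j) 0))
          = X.set i.toNat c := if_pos hji
      rw [hstep, ih c hj']
      have : decide (0 ≤ i - j) = false := by simp; omega
      simp only [List.filter_cons, this, Bool.false_eq_true, if_false]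
    · have hstep : (if i - j < 0 then X.set i.toNat c
          else if red.contains i = true then PySem.List.pySetD (X.set i.toNat c) i 0
          else PySem.List.pySetD (X.set i.toNat c) i
            (PySem.List.pyGetD (X.set i.toNat c) i 0 + PySem.List.pyGetD (X.set i.toNat c) (i - j) 0))
          = X.set i.toNat (c + X.getD (i - j).toNat 0) := by
        rw [if_neg hji, hred]
        simp only [Bool.false_eq_true, if_false]
        rw [PySem.List.pySetD_of_nonneg _ _ (by omega),
          PySem.List.pyGetD_eq_getElem _ _ (by omega) (by simp; omega),
          PySem.List.pyGetD_eq_getElem _ _ (by omega) (by simp; omega)]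
        rw [List.set_set]
        congr 1
        have h1 : (X.set i.toNat c)[i.toNat]'(by simpa using hlen) = c :=
          List.getElem_set_self (by simpa using hlen)
        have h2 : (X.set i.toNat c)[(i - j).toNat]'(by simp; omega) = X.getD (i - j).toNat 0 := by
          rw [List.getElem_set_ne (by omega)]
          rw [List.getD_eq_getElem _ _ (by omega)]
        rw [h1, h2]
      rw [hstep, ih _ hj']
      have hfil : decide (0 ≤ i - j) = true := by simp; omega
      simp only [List.filter_cons, hfil, if_true, List.map_cons, List.sum_cons]
      ring_nf

lemma stepA_eq (k : Int) (red : List Int) (m r : Nat) (hr : 1 ≤ r) :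
    stepA k red (dpL k red m ++ List.replicate r 0) ((m : Int) + 1)
      = dpL k red (m + 1) ++ List.replicate (r - 1) 0 := by
  obtain ⟨r', rfl⟩ : ∃ r', r = r' + 1 := ⟨r - 1, by omega⟩
  set L := dpL k red m with hLdef
  have hL : L.length = m + 1 := dpL_length k red m
  have hrepl : List.replicate (r' + 1) (0:Int) = 0 :: List.replicate r' 0 := rfl
  have htoNat : ((m : Int) + 1).toNat = m + 1 := by omega
  have hdp_set : ∀ x : Int, (L ++ List.replicate (r' + 1) (0:Int)).set (m + 1) x
      = L ++ x :: List.replicate r' 0 := by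
    intro x
    rw [hrepl, ← hL, set_append_cons]
  have hself : PySem.List.pySetD (L ++ List.replicate (r' + 1) (0:Int)) ((m : Int) + 1) 0
      = L ++ List.replicate (r' + 1) 0 := by
    rw [PySem.List.pySetD_of_nonneg _ _ (by omega), htoNat, hdp_set]
    rfl
  have hcast : ((m + 1 : Nat) : Int) = (m : Int) + 1 := by push_cast; ring
  unfold stepA
  by_cases hc : red.contains ((m : Int) + 1) = true
  · rw [foldA_red red _ _ _ hc hself]
    have : dpL k red (m + 1) = L ++ [0] := by
      unfold dpL
      rw [← hLdef, hcast, hc]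
      simp
    rw [this, hrepl]
    simp
  · have hc' : red.contains ((m : Int) + 1) = false := by
      revert hc; cases red.contains ((m : Int) + 1) <;> simp
    have hstart : L ++ List.replicate (r' + 1) (0:Int)
        = (L ++ List.replicate (r' + 1) (0:Int)).set ((m:Int)+1).toNat 0 := by
      rw [htoNat, hdp_set]; rfl
    rw [hstart, foldA_sum red _ (by omega) _ _ _ hc'
        (fun j hj => ((PySem.List.mem_pyRange_one).1 hj).1)
        (by rw [htoNat]; simp [hL])]
    -- identify the accumulated sum with winsum L k
    have hsum : (((PySem.List.pyRange 1 (k + 1) 1).filter (fun j => decide (0 ≤ (m:Int) + 1 - j))).map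
          (fun j => (L ++ List.replicate (r' + 1) (0:Int)).getD ((m:Int) + 1 - j).toNat 0)).sum
        = winsum L k := by
      rw [PySem.List.pyRange_one]
      have hk1 : ((k : Int) + 1 - 1).toNat = k.toNat := by omega
      rw [hk1]
      rw [List.filter_map, List.map_map]
      have hfil : ((List.range k.toNat).filter ((fun j => decide (0 ≤ (m:Int) + 1 - j)) ∘ (fun t : Nat => (1:Int) + t)))
          = (List.range k.toNat).filter (fun t => decide (t < m + 1)) := by
        apply List.filter_congr
        intro t _
        simp [Function.comp]
        omega
      rw [hfil, filter_range_lt]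
      unfold winsum
      rw [hL]
      congr 1
      apply List.map_congr_left
      intro t ht
      rw [List.mem_range] at ht
      have harg : ((m:Int) + 1 - (1 + t)).toNat = m - t := by omega
      simp only [Function.comp]
      rw [harg]
      have hlt : m - t < L.length := by omega
      have : m + 1 - 1 - t = m - t := by omega
      rw [this, List.getD_append _ _ _ _ hlt]
    rw [hsum, htoNat, hdp_set]
    unfold dpL
    rw [← hLdef, hcast, hc']
    simp

lemma stepB_eq (k : Int) (red : List Int) (m r : Nat) (hr : 1 ≤ r) :
    stepB (max k 0) (PySem.Set.ofList red)
      (dpL k red m ++ List.replicate r 0, winsum ((dpL k red m).take m) k) ((m : Int) + 1)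
      = (dpL k red (m + 1) ++ List.replicate (r - 1) 0, winsum (dpL k red m) k) := by
  obtain ⟨r', rfl⟩ : ∃ r', r = r' + 1 := ⟨r - 1, by omega⟩
  set L := dpL k red m with hLdef
  have hL : L.length = m + 1 := dpL_length k red m
  have hcast : ((m + 1 : Nat) : Int) = (m : Int) + 1 := by push_cast; ring
  have hlen : (L ++ List.replicate (r' + 1) (0:Int)).length = m + 1 + (r' + 1) := by
    simp [hL]
  have hread_m : PySem.List.pyGetD (L ++ List.replicate (r' + 1) (0:Int)) ((m:Int) + 1 - 1) 0
      = L.getD m 0 := by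
    have h1 : (m:Int) + 1 - 1 = ((m : Nat) : Int) := by omega
    rw [h1, PySem.List.pyGetD_natCast]
    exact List.getD_append _ _ _ _ (by omega)
  have hw : (if (m:Int) + 1 - 1 - (max k 0) ≥ 0 then
        winsum (L.take m) k + PySem.List.pyGetD (L ++ List.replicate (r' + 1) (0:Int)) ((m:Int) + 1 - 1) 0
          - PySem.List.pyGetD (L ++ List.replicate (r' + 1) (0:Int)) ((m:Int) + 1 - 1 - (max k 0)) 0
      else winsum (L.take m) k + PySem.List.pyGetD (L ++ List.replicate (r' + 1) (0:Int)) ((m:Int) + 1 - 1) 0)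
      = winsum L k := by
    have hcond : ((m:Int) + 1 - 1 - (max k 0) ≥ 0) ↔ k.toNat ≤ m := by omega
    by_cases hk : k.toNat ≤ m
    · rw [if_pos (hcond.2 hk), hread_m]
      have hidx : (m:Int) + 1 - 1 - (max k 0) = ((m - k.toNat : Nat) : Int) := by omega
      rw [hidx, PySem.List.pyGetD_natCast, List.getD_append _ _ _ _ (by omega)]
      have := winsum_step L m hL k
      rw [if_pos hk] at this
      exact this
    · rw [if_neg (fun h => hk (hcond.1 h)), hread_m]
      have := winsum_step L m hL k
      rw [if_neg hk] at this
      exact this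
  have hcontains : PySem.Set.contains (PySem.Set.ofList red) ((m:Int) + 1)
      = red.contains ((m + 1 : Nat) : Int) := by
    rw [hcast, Bool.eq_iff_iff, PySem.Set.contains_iff, PySem.Set.mem_ofList, List.contains_iff_mem]
  unfold stepB
  simp only []
  rw [hw, hcontains]
  have hdL : dpL k red (m + 1)
      = dpL k red m ++ [if red.contains ((m + 1 : Nat) : Int) then 0 else winsum (dpL k red m) k] := rfl
  have hset : PySem.List.pySetD (L ++ List.replicate (r' + 1) (0:Int)) ((m:Int) + 1)
        (if red.contains ((m + 1 : Nat) : Int) then 0 else winsum L k)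
      = dpL k red (m + 1) ++ List.replicate r' 0 := by
    have htoNat : ((m : Int) + 1).toNat = m + 1 := by omega
    have hrepl : List.replicate (r' + 1) (0:Int) = 0 :: List.replicate r' 0 := rfl
    have hdp_set : ∀ x : Int, (L ++ List.replicate (r' + 1) (0:Int)).set (m + 1) x
        = L ++ x :: List.replicate r' 0 := by
      intro x
      rw [hrepl, ← hL, set_append_cons]
    rw [PySem.List.pySetD_of_nonneg _ _ (by omega), htoNat, hdp_set, hdL, ← hLdef]
    simp
  rw [hset]
  rfl

lemma foldA_all (k : Int) (red : List Int) (N : Nat) :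
    ∀ m : Nat, m ≤ N →
    (PySem.List.pyRange 1 ((m : Int) + 1) 1).foldl (stepA k red) (dpL k red 0 ++ List.replicate N 0)
      = dpL k red m ++ List.replicate (N - m) 0 := by
  intro m
  induction m with
  | zero =>
    intro _
    rw [PySem.List.pyRange_one_eq_nil (by omega)]
    simp
  | succ m ih =>
    intro hm
    have h1 : ((m + 1 : Nat) : Int) + 1 = ((m : Int) + 1) + 1 := by push_cast; ring
    rw [h1, PySem.List.pyRange_one_succ_right (by omega), List.foldl_append, ih (by omega)]
    have hcast : ((m : Int) + 1) = ((m + 1 : Nat) : Int) := by push_cast; ring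
    simp only [List.foldl_cons, List.foldl_nil]
    rw [stepA_eq k red m (N - m) (by omega)]
    have : N - m - 1 = N - (m + 1) := by omega
    rw [this]

lemma foldB_all (k : Int) (red : List Int) (N : Nat) :
    ∀ m : Nat, m ≤ N →
    (PySem.List.pyRange 1 ((m : Int) + 1) 1).foldl (stepB (max k 0) (PySem.Set.ofList red))
        (dpL k red 0 ++ List.replicate N 0, 0)
      = (dpL k red m ++ List.replicate (N - m) 0, winsum ((dpL k red m).take m) k) := by
  intro m
  induction m with
  | zero =>
    intro _
    rw [PySem.List.pyRange_one_eq_nil (by omega)]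
    simp [winsum]
  | succ m ih =>
    intro hm
    have h1 : ((m + 1 : Nat) : Int) + 1 = ((m : Int) + 1) + 1 := by push_cast; ring
    rw [h1, PySem.List.pyRange_one_succ_right (by omega), List.foldl_append, ih (by omega)]
    simp only [List.foldl_cons, List.foldl_nil]
    rw [stepB_eq k red m (N - m) (by omega)]
    have hdL : dpL k red (m + 1)
        = dpL k red m ++ [if red.contains ((m + 1 : Nat) : Int) then 0 else winsum (dpL k red m) k] := rfl
    have htake : (dpL k red (m + 1)).take (m + 1) = dpL k red m := by
      rw [hdL]
      exact List.take_left' (dpL_length k red m)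
    rw [htake]
    have : N - m - 1 = N - (m + 1) := by omega
    rw [this]

-- ===== VERDICT (by name: the statement is the Claim_ definition above) =====
theorem climbingRedStairs_spec : Claim_equal_climbingRedStairs := by
  intro n k red _ hpre
  unfold Spec_climbingRedStairs
  have hpre' : 0 ≤ n := hpre
  obtain ⟨N, rfl⟩ : ∃ N : Nat, (N : Int) = n := ⟨n.toNat, by omega⟩
  have hdp0 : PySem.List.pySetD (List.replicate ((N : Int) + 1).toNat (0 : Int)) 0 1
      = dpL k red 0 ++ List.replicate N 0 := by
    rw [PySem.List.pySetD_of_nonneg _ _ (by omega)]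
    have h1 : ((N : Int) + 1).toNat = N + 1 := by omega
    rw [h1]
    have : List.replicate (N + 1) (0:Int) = 0 :: List.replicate N 0 := rfl
    rw [this]
    rfl
  show climbingRedStairs _ _ _ = climbingRedStairs_alt _ _ _
  unfold climbingRedStairs climbingRedStairs_alt
  simp only []
  rw [hdp0]
  have hA := foldA_all k red N N (le_refl N)
  have hB := foldB_all k red N N (le_refl N)
  show PySem.List.pyGetD ((PySem.List.pyRange 1 ((N:Int) + 1) 1).foldl (stepA k red)
        (dpL k red 0 ++ List.replicate N 0)) (N : Int) 0
      = PySem.List.pyGetD (((PySem.List.pyRange 1 ((N:Int) + 1) 1).foldl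
        (stepB (max k 0) (PySem.Set.ofList red)) (dpL k red 0 ++ List.replicate N 0, 0)).1) (N : Int) 0
  rw [hA, hB]
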